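-- pv_equiv track=rewrite | github.com/joe-mcgill/euler | 36.py | is_pbin
-- ===== SOURCE A (Python) =====
-- def is_pbin(x):
-- 	str10=[i for i in str(x)]
-- 	strbin=[i for i in bin(x).split('b')[1]]
-- 	binval=True
-- 	val10=True
-- 	for i in range(int(len(strbin)/2)):
-- 		if strbin[0]=='0':
-- 			binval=False
-- 		if (strbin[i]==strbin[-(i+1)]):
-- 			pass
-- 		else:
-- 			binval=False
-- 	for i in range(int(len(str10)/2)):
-- 		if str10[0]=='0':
-- 			val10=False
-- 		if (str10[i]==str10[-(i+1)]):
-- 			pass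
-- 		else:
-- 			val10=False
-- 	return binval & val10
-- ===== SOURCE B (Python) =====
-- def is_pbin(x):
--     # arithmetic digit reversal instead of string/list palindrome scans
--     if x < 0:
--         val10 = False
--     else:
--         r, n = 0, x
--         while n > 0:
--             r = r * 10 + n % 10
--             n //= 10
--         val10 = r == x
--     m = abs(x)
--     r = 0
--     while m > 0:
--         r = r * 2 + m % 2
--         m //= 2
--     binval = r == abs(x)
--     return binval and val10
-- ===== Notes on version B (the rewrite author's own statement) =====
-- stated objective: alternative
-- what changed: Replaces A's string/list construction (str, bin, split, half-index comparison loops) by pure arithmetic digit reversal in the decimal and binary bases, comparing the reversed number with the original.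
import Mathlib
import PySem

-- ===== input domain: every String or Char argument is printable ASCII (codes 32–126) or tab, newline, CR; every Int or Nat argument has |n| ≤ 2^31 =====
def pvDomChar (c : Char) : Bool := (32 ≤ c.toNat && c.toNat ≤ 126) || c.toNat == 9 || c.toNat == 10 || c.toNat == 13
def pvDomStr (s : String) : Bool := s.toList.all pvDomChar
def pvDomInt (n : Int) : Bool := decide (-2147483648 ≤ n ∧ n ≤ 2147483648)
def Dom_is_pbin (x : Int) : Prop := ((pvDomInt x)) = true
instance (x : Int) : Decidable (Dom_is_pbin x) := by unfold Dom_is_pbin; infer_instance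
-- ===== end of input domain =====

-- B replaces A's string/list palindrome scans by arithmetic digit reversal in the decimal and binary bases (alternative decomposition, same cost).


-- ===== PORT A =====
def is_pbin (x : Int) : Bool :=
  -- str10 = [i for i in str(x)]
  let str10 : List Char := (PySem.Int.toStr x).toList
  -- strbin = [i for i in bin(x).split('b')[1]]  ('b' is always present, so [1] never raises; pyGetD "" marks the unreachable IndexError)
  let strbin : List Char :=
    (PySem.List.pyGetD ((PySem.Str.split? (PySem.Int.pyBin x) "b").getD []) 1 "").toList
  -- int(len(strbin)/2) = floor division by 2 (exact here: lengths are nonnegative)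
  let binval : Bool :=
    (PySem.List.pyRange 0 (PySem.Int.floordiv (strbin.length : Int) 2) 1).foldl
      (fun binval i =>
        let binval := if PySem.List.pyGetD strbin 0 ' ' == '0' then false else binval
        if PySem.List.pyGetD strbin i ' ' == PySem.List.pyGetD strbin (-(i + 1)) ' ' then binval
        else false) true
  let val10 : Bool :=
    (PySem.List.pyRange 0 (PySem.Int.floordiv (str10.length : Int) 2) 1).foldl
      (fun val10 i =>
        let val10 := if PySem.List.pyGetD str10 0 ' ' == '0' then false else val10
        if PySem.List.pyGetD str10 i ' ' == PySem.List.pyGetD str10 (-(i + 1)) ' ' then val10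
        else false) true
  binval && val10

-- ===== PORT B =====
-- 'while n > 0: r = r*10 + n%10; n //= 10' — the loop runs on nonnegative ints, carried as Nat
def pvRev10 (n r : Nat) : Nat :=
  if h : n = 0 then r else pvRev10 (n / 10) (r * 10 + n % 10)
decreasing_by exact Nat.div_lt_self (Nat.pos_of_ne_zero h) (by norm_num)

-- 'while m > 0: r = r*2 + m%2; m //= 2'
def pvRev2 (n r : Nat) : Nat :=
  if h : n = 0 then r else pvRev2 (n / 2) (r * 2 + n % 2)
decreasing_by exact Nat.div_lt_self (Nat.pos_of_ne_zero h) (by norm_num)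

def is_pbin_alt (x : Int) : Bool :=
  let val10 : Bool := if x < 0 then false else decide (pvRev10 x.toNat 0 = x.toNat)
  let binval : Bool := decide (pvRev2 x.natAbs 0 = x.natAbs)
  binval && val10

-- ===== PRECONDITION & SPEC =====
def Spec_is_pbin (x : Int) (out : Bool) : Prop := out = is_pbin_alt x
instance (x : Int) (out : Bool) : Decidable (Spec_is_pbin x out) := by unfold Spec_is_pbin; infer_instance

-- ===== CLAIM (what is proved, stated in full; the proofs are below) =====
def Claim_equal_is_pbin : Prop := ∀ (x : Int), Dom_is_pbin x → Spec_is_pbin x (is_pbin x)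

-- ===== LEMMAS AND PROOFS =====

theorem pv_foldl_and (p : Int → Bool) (rng : List Int) (b : Bool) :
    rng.foldl (fun v i => if p i then v else false) b = (b && rng.all p) := by
  induction rng generalizing b with
  | nil => simp
  | cons x t ih =>
    simp only [List.foldl_cons, List.all_cons, ih]
    by_cases h : p x <;> simp [h]

theorem pv_map_inj {α β : Type} (f : α → β) :
    ∀ (l l' : List α), (∀ a ∈ l, ∀ b ∈ l', f a = f b → a = b) →
      l.map f = l'.map f → l = l' := by
  intro l
  induction l with
  | nil => intro l' _ h; cases l' <;> simp_all
  | cons x t ih =>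
    intro l' hinj h
    cases l' with
    | nil => simp_all
    | cons y t' =>
      simp only [List.map_cons, List.cons.injEq] at h
      have hx : x = y := hinj x (by simp) y (by simp) h.1
      have := ih t' (fun a ha b hb => hinj a (by simp [ha]) b (by simp [hb])) h.2
      simp [hx, this]

theorem pv_toDigitsCore_eq (b : Nat) (hb : 1 < b) :
    ∀ (fuel n : Nat) (L : List Char), n ≠ 0 → n ≤ fuel →
      Nat.toDigitsCore b fuel n L = ((Nat.digits b n).map Nat.digitChar).reverse ++ L := by
  intro fuel
  induction fuel with
  | zero => intro n L hn hf; omega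
  | succ f ih =>
    intro n L hn hf
    rw [Nat.toDigitsCore]
    have hdig := Nat.digits_def' hb (Nat.pos_of_ne_zero hn)
    by_cases h : n / b = 0
    · have : Nat.digits b (n / b) = [] := by rw [h]; simp
      rw [if_pos h, hdig, this]
      simp
    · rw [if_neg h, ih (n / b) _ h (by
        have := Nat.div_lt_self (Nat.pos_of_ne_zero hn) hb
        omega), hdig]
      simp

theorem pv_toDigits_eq (b n : Nat) (hb : 1 < b) (hn : n ≠ 0) :
    Nat.toDigits b n = ((Nat.digits b n).map Nat.digitChar).reverse := by
  rw [Nat.toDigits, pv_toDigitsCore_eq b hb (n+1) n [] hn (by omega)]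
  simp

theorem pv_mem_toDigits (b n : Nat) (hb : 1 < b) {c : Char} (hc : c ∈ Nat.toDigits b n) :
    ∃ d, d < b ∧ c = Nat.digitChar d := by
  by_cases hn : n = 0
  · subst hn
    simp [Nat.toDigits, Nat.toDigitsCore] at hc
    exact ⟨0, by omega, by simp [hc]⟩
  · rw [pv_toDigits_eq b n hb hn] at hc
    simp only [List.mem_reverse, List.mem_map] at hc
    obtain ⟨d, hd, rfl⟩ := hc
    exact ⟨d, Nat.digits_lt_base hb hd, rfl⟩

theorem pv_b_not_mem (n : Nat) : 'b' ∉ Nat.toDigits 2 n := by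
  intro h
  obtain ⟨d, hd, he⟩ := pv_mem_toDigits 2 n (by norm_num) h
  interval_cases d <;> exact absurd he (by decide)

theorem pv_splitOn_go_no_sep (bs : List Char) (hbs : 'b' ∉ bs) :
    ∀ (fuel : Nat) (cur : List Char) (acc : List (List Char)), bs.length ≤ fuel →
      PySem.Chars.splitOn.go ['b'] fuel bs cur acc = acc.reverse ++ [cur.reverse ++ bs] := by
  induction bs with
  | nil =>
    intro fuel cur acc _
    cases fuel <;> simp [PySem.Chars.splitOn.go]
  | cons c rest ih =>
    intro fuel cur acc hf
    have hc : c ≠ 'b' := by intro h; exact hbs (by simp [h])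
    cases fuel with
    | zero => simp at hf
    | succ f =>
      rw [PySem.Chars.splitOn.go]
      have hpre : List.isPrefixOf ['b'] (c :: rest) = false := by
        simp [List.isPrefixOf]
        intro h; exact absurd h.symm hc
      rw [if_neg (by simp [hpre])]
      rw [ih (by intro h; exact hbs (by simp [h])) f (c :: cur) acc (by simp at hf; omega)]
      simp

theorem pv_splitOn_go_split (bs : List Char) (hbs : 'b' ∉ bs) :
    ∀ (as : List Char) (fuel : Nat) (cur : List Char) (acc : List (List Char)),
      'b' ∉ as → as.length + bs.length + 1 ≤ fuel →
      PySem.Chars.splitOn.go ['b'] fuel (as ++ 'b' :: bs) cur acc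
        = acc.reverse ++ [cur.reverse ++ as, bs] := by
  intro as
  induction as with
  | nil =>
    intro fuel cur acc _ hf
    cases fuel with
    | zero => simp at hf
    | succ f =>
      simp only [List.nil_append]
      rw [PySem.Chars.splitOn.go]
      rw [if_pos (by simp [List.isPrefixOf])]
      simp only [List.length_cons, List.length_nil, List.drop_succ_cons, List.drop_zero]
      rw [pv_splitOn_go_no_sep bs hbs f [] (cur.reverse :: acc) (by simp at hf; simpa using hf)]
      simp
  | cons a t ih =>
    intro fuel cur acc ha hf
    have hab : a ≠ 'b' := by intro h; exact ha (by simp [h])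
    cases fuel with
    | zero => simp at hf
    | succ f =>
      simp only [List.cons_append]
      rw [PySem.Chars.splitOn.go]
      have hpre : List.isPrefixOf ['b'] (a :: (t ++ 'b' :: bs)) = false := by
        simp [List.isPrefixOf]
        intro h; exact absurd h.symm hab
      rw [if_neg (by simp [hpre])]
      rw [ih f (a :: cur) acc (by intro h; exact ha (by simp [h])) (by simp at hf ⊢; omega)]
      simp

theorem pv_splitOn_single (as bs : List Char) (ha : 'b' ∉ as) (hb : 'b' ∉ bs) :
    PySem.Chars.splitOn (as ++ 'b' :: bs) ['b'] = [as, bs] := by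
  rw [PySem.Chars.splitOn]
  rw [pv_splitOn_go_split bs hb as ((as ++ 'b' :: bs).length + 1) [] [] ha (by simp)]
  simp

theorem pv_strbin (x : Int) :
    (PySem.List.pyGetD ((PySem.Str.split? (PySem.Int.pyBin x) "b").getD []) 1 "").toList
      = Nat.toDigits 2 x.natAbs := by
  by_cases hx : x < 0
  · have hsplit : PySem.Chars.split? (['-', '0'] ++ 'b' :: Nat.toDigits 2 x.natAbs) ['b']
        = some (PySem.Chars.splitOn (['-', '0'] ++ 'b' :: Nat.toDigits 2 x.natAbs) ['b']) := by
      simp [PySem.Chars.split?]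
    have hlist : (PySem.Int.pyBin x).toList = ['-', '0'] ++ 'b' :: Nat.toDigits 2 x.natAbs := by
      simp [PySem.Int.toList_pyBin, PySem.Int.toBinChars0b, hx]
    rw [PySem.Str.split?]
    simp only [hlist]
    rw [show ("b" : String).toList = ['b'] from rfl]
    rw [hsplit, pv_splitOn_single ['-', '0'] _ (by decide) (pv_b_not_mem _)]
    simp [PySem.List.pyGetD, PySem.List.pyGet?, PySem.List.pyIdx?]
  · have hlist : (PySem.Int.pyBin x).toList = ['0'] ++ 'b' :: Nat.toDigits 2 x.natAbs := by
      simp [PySem.Int.toList_pyBin, PySem.Int.toBinChars0b, hx]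
      congr 1
      omega
    rw [PySem.Str.split?]
    simp only [hlist]
    rw [show ("b" : String).toList = ['b'] from rfl]
    have hsplit : PySem.Chars.split? (['0'] ++ 'b' :: Nat.toDigits 2 x.natAbs) ['b']
        = some (PySem.Chars.splitOn (['0'] ++ 'b' :: Nat.toDigits 2 x.natAbs) ['b']) := by
      simp [PySem.Chars.split?]
    rw [hsplit, pv_splitOn_single ['0'] _ (by decide) (pv_b_not_mem _)]
    simp [PySem.List.pyGetD, PySem.List.pyGet?, PySem.List.pyIdx?]

theorem pv_halfpal_iff (l : List Char) :
    (∀ k, k < l.length / 2 → l.getD k ' ' = l.getD (l.length - 1 - k) ' ') ↔ l.reverse = l := by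
  constructor
  · intro h
    apply List.ext_getElem (by simp)
    intro k h1 h2
    rw [List.getElem_reverse]
    rcases Nat.lt_or_ge k (l.length / 2) with hk | hk
    · have := h k hk
      rw [List.getD_eq_getElem l ' ' h2, List.getD_eq_getElem l ' ' (by omega)] at this
      exact this.symm
    · rcases Nat.lt_or_ge (l.length - 1 - k) (l.length / 2) with hj | hj
      · have := h (l.length - 1 - k) hj
        rw [List.getD_eq_getElem l ' ' (by omega), List.getD_eq_getElem l ' ' (by omega)] at this
        have hkk : l.length - 1 - (l.length - 1 - k) = k := by omega
        simp_rw [hkk] at this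
        exact this
      · have : l.length - 1 - k = k := by omega
        simp_rw [this]
  · intro h k hk
    have h2 : k < l.length := by omega
    have h3 : l.length - 1 - k < l.length := by omega
    rw [List.getD_eq_getElem l ' ' h2, List.getD_eq_getElem l ' ' h3]
    rw [List.getElem_of_eq h.symm h2, List.getElem_reverse]

theorem pv_loop_eq (l : List Char) (h0 : 2 ≤ l.length → l.headD ' ' ≠ '0') :
    (PySem.List.pyRange 0 (PySem.Int.floordiv (l.length : Int) 2) 1).foldl
      (fun v i =>
        let v := if PySem.List.pyGetD l 0 ' ' == '0' then false else v
        if PySem.List.pyGetD l i ' ' == PySem.List.pyGetD l (-(i + 1)) ' ' then v else false) true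
    = decide (l.reverse = l) := by
  have hfd : PySem.Int.floordiv (l.length : Int) 2 = ((l.length / 2 : Nat) : Int) := by
    exact_mod_cast PySem.Int.floordiv_natCast l.length 2
  rw [hfd]
  by_cases hlen : l.length < 2
  · have h2 : l.length / 2 = 0 := by omega
    rw [h2]
    rw [PySem.List.pyRange_one_eq_nil (by norm_num)]
    simp only [List.foldl_nil]
    match l, hlen with
    | [], _ => simp
    | [a], _ => simp
  · rw [Nat.not_lt] at hlen
    have hhead : (PySem.List.pyGetD l 0 ' ' == '0') = false := by
      have hne := h0 hlen
      cases l with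
      | nil => simp at hlen
      | cons a t =>
        rw [PySem.List.pyGetD_zero_cons]
        simpa using hne
    have hfun : (fun (v : Bool) (i : Int) =>
        let v := if PySem.List.pyGetD l 0 ' ' == '0' then false else v
        if PySem.List.pyGetD l i ' ' == PySem.List.pyGetD l (-(i + 1)) ' ' then v else false)
        = (fun v i => if (PySem.List.pyGetD l i ' ' == PySem.List.pyGetD l (-(i + 1)) ' ') then v
            else false) := by
      funext v i; simp [hhead]
    rw [hfun, pv_foldl_and]
    rw [Bool.true_and, Bool.eq_iff_iff]
    simp only [List.all_eq_true, PySem.List.mem_pyRange_one, decide_eq_true_eq, beq_iff_eq]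
    rw [← pv_halfpal_iff]
    constructor
    · intro h k hk
      have hk' : k < l.length := by omega
      have h1k : k + 1 ≤ l.length := by omega
      have := h (k : Int) ⟨by positivity, by exact_mod_cast hk⟩
      rw [PySem.List.pyGetD_natCast] at this
      rw [show (-((k : Int) + 1)) = -(((k + 1 : Nat) : Int)) by push_cast; ring] at this
      rw [PySem.List.pyGetD_neg_natCast l (k + 1) ' ' (by omega) h1k] at this
      have hidx : l.length - (k + 1) = l.length - 1 - k := by omega
      simp only [hidx] at this
      rw [List.getD_eq_getElem l ' ' (by omega : l.length - 1 - k < l.length)]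
      exact this
    · intro h i hi
      obtain ⟨hi0, hi2⟩ := hi
      set k : Nat := i.toNat with hkdef
      have hik : i = (k : Int) := by omega
      have hk : k < l.length / 2 := by omega
      have hk' : k < l.length := by omega
      have h1k : k + 1 ≤ l.length := by omega
      have := h k hk
      rw [List.getD_eq_getElem l ' ' (by omega : l.length - 1 - k < l.length)] at this
      rw [hik, PySem.List.pyGetD_natCast]
      rw [show (-((k : Int) + 1)) = -(((k + 1 : Nat) : Int)) by push_cast; ring]
      rw [PySem.List.pyGetD_neg_natCast l (k + 1) ' ' (by omega) h1k]
      have hidx : l.length - (k + 1) = l.length - 1 - k := by omega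
      simp only [hidx]
      exact this

theorem pv_digitChar_inj : ∀ d, d < 16 → ∀ e, e < 16 → Nat.digitChar d = Nat.digitChar e → d = e := by decide

theorem pv_char_pal_iff (b n : Nat) (hb : 1 < b) (hb16 : b ≤ 16) :
    ((Nat.toDigits b n).reverse = Nat.toDigits b n)
      ↔ ((Nat.digits b n).reverse = Nat.digits b n) := by
  by_cases hn : n = 0
  · subst hn; simp [Nat.toDigits, Nat.toDigitsCore]
  · rw [pv_toDigits_eq b n hb hn, List.reverse_reverse, ← List.map_reverse]
    constructor
    · intro h
      have := pv_map_inj Nat.digitChar (Nat.digits b n) ((Nat.digits b n).reverse)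
        (fun a ha c hc he => pv_digitChar_inj a (by have := Nat.digits_lt_base hb ha; omega)
          c (by have := Nat.digits_lt_base hb (List.mem_reverse.mp hc); omega) he) h
      exact this.symm
    · intro h; rw [h]

theorem pv_ofDigits_rev_eq_iff (b n : Nat) (hb : 1 < b) :
    Nat.ofDigits b ((Nat.digits b n).reverse) = (n : Nat)
      ↔ ((Nat.digits b n).reverse = Nat.digits b n) := by
  constructor
  · intro h
    by_cases hn : n = 0
    · subst hn; simp
    · have hmem : ∀ d ∈ (Nat.digits b n).reverse, d < b :=
        fun d hd => Nat.digits_lt_base hb (List.mem_reverse.mp hd)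
      have hnil : Nat.digits b n ≠ [] := Nat.digits_ne_nil_iff_ne_zero.mpr hn
      have hdef := Nat.digits_def' hb (Nat.pos_of_ne_zero hn)
      by_cases hh : n % b = 0
      · -- head of digits is 0: reversed value is strictly smaller than n, contradiction
        exfalso
        have hrev : (Nat.digits b n).reverse = (Nat.digits b (n / b)).reverse ++ [n % b] := by
          rw [hdef]; simp
        rw [hrev, hh, Nat.ofDigits_append] at h
        simp [Nat.ofDigits] at h
        -- h : ofDigits b (digits b (n/b)).reverse = n
        have hlt : Nat.ofDigits b (Nat.digits b (n / b)).reverse < b ^ (Nat.digits b (n / b)).length := by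
          have : ∀ d ∈ (Nat.digits b (n / b)).reverse, d < b :=
            fun d hd => Nat.digits_lt_base hb (List.mem_reverse.mp hd)
          calc Nat.ofDigits b (Nat.digits b (n / b)).reverse
              < b ^ (Nat.digits b (n / b)).reverse.length := by
                rcases b with _ | _ | b'
                · omega
                · omega
                · exact Nat.ofDigits_lt_base_pow_length' this
            _ = b ^ (Nat.digits b (n / b)).length := by rw [List.length_reverse]
        have hlen : (Nat.digits b n).length = (Nat.digits b (n / b)).length + 1 := by
          rw [hdef]; simp
        have hpow : b ^ (Nat.digits b n).length ≤ b * n := Nat.base_pow_length_digits_le b n hb hn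
        rw [hlen, pow_succ] at hpow
        have : b ^ (Nat.digits b (n / b)).length ≤ n := by
          nlinarith [Nat.one_le_iff_ne_zero.mpr (pow_ne_zero (Nat.digits b (n / b)).length (by omega : b ≠ 0))]
        omega
      · have hlast : ∀ (hne : (Nat.digits b n).reverse ≠ []),
            ((Nat.digits b n).reverse).getLast hne ≠ 0 := by
          intro hne
          rw [List.getLast_reverse]
          simp [hdef, hh]
        have := Nat.digits_ofDigits b hb ((Nat.digits b n).reverse) hmem hlast
        rw [h] at this
        exact this.symm
  · intro h; rw [h, Nat.ofDigits_digits]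

theorem pvRev10_eq (n : Nat) : ∀ r : Nat,
    pvRev10 n r = r * 10 ^ (Nat.digits 10 n).length + Nat.ofDigits 10 (Nat.digits 10 n).reverse := by
  induction n using Nat.strong_induction_on with
  | _ n ih =>
    intro r
    rw [pvRev10]
    by_cases h : n = 0
    · simp [h]
    · have hdig := Nat.digits_def' (by norm_num : 1 < 10) (Nat.pos_of_ne_zero h)
      rw [dif_neg h, ih (n / 10) (Nat.div_lt_self (Nat.pos_of_ne_zero h) (by norm_num)), hdig]
      simp only [List.reverse_cons, Nat.ofDigits_append, List.length_cons, List.length_reverse]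
      simp [Nat.ofDigits]
      ring

theorem pv_head_toDigits_ne (b n : Nat) (hb : 1 < b) (hb16 : b ≤ 16) (hn : n ≠ 0) :
    (Nat.toDigits b n).headD ' ' ≠ '0' := by
  rw [pv_toDigits_eq b n hb hn]
  have hnil : Nat.digits b n ≠ [] := Nat.digits_ne_nil_iff_ne_zero.mpr hn
  have hne : ((Nat.digits b n).map Nat.digitChar) ≠ [] := by simpa using hnil
  have hrev : ((Nat.digits b n).map Nat.digitChar).reverse ≠ [] := by simpa using hne
  rw [List.headD_eq_head?_getD, List.head?_reverse, List.getLast?_map,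
    List.getLast?_eq_some_getLast hnil]
  simp only [Option.map_some, Option.getD_some]
  have hlast := Nat.getLast_digit_ne_zero b hn
  have hlt : (Nat.digits b n).getLast hnil < b :=
    Nat.digits_lt_base hb (List.getLast_mem hnil)
  have : ∀ d, d < 16 → d ≠ 0 → Nat.digitChar d ≠ '0' := by decide
  exact this _ (by omega) hlast

theorem pvRev2_eq (n : Nat) : ∀ r : Nat,
    pvRev2 n r = r * 2 ^ (Nat.digits 2 n).length + Nat.ofDigits 2 (Nat.digits 2 n).reverse := by
  induction n using Nat.strong_induction_on with
  | _ n ih =>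
    intro r
    rw [pvRev2]
    by_cases h : n = 0
    · simp [h]
    · have hdig := Nat.digits_def' (by norm_num : 1 < 2) (Nat.pos_of_ne_zero h)
      rw [dif_neg h, ih (n / 2) (Nat.div_lt_self (Nat.pos_of_ne_zero h) (by norm_num)), hdig]
      simp only [List.reverse_cons, Nat.ofDigits_append, List.length_cons, List.length_reverse]
      simp [Nat.ofDigits]
      ring

-- per-base: A's char-level palindrome test equals B's arithmetic reversal test
theorem pv_num_pal (m : Nat) :
    decide ((Nat.toDigits 2 m).reverse = Nat.toDigits 2 m) = decide (pvRev2 m 0 = m) := by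
  rw [decide_eq_decide, pv_char_pal_iff 2 m (by norm_num) (by norm_num),
    ← pv_ofDigits_rev_eq_iff 2 m (by norm_num), pvRev2_eq m 0]
  simp

theorem pv_num_pal10 (m : Nat) :
    decide ((Nat.toDigits 10 m).reverse = Nat.toDigits 10 m) = decide (pvRev10 m 0 = m) := by
  rw [decide_eq_decide, pv_char_pal_iff 10 m (by norm_num) (by norm_num),
    ← pv_ofDigits_rev_eq_iff 10 m (by norm_num), pvRev10_eq m 0]
  simp

theorem pv_h0_toDigits (b m : Nat) (hb : 1 < b) (hb16 : b ≤ 16) :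
    2 ≤ (Nat.toDigits b m).length → (Nat.toDigits b m).headD ' ' ≠ '0' := by
  intro hlen
  by_cases hm : m = 0
  · subst hm
    simp [Nat.toDigits, Nat.toDigitsCore] at hlen
  · exact pv_head_toDigits_ne b m hb hb16 hm

theorem pv_neg_not_pal (m : Nat) (hm : m ≠ 0) :
    ('-' :: Nat.toDigits 10 m).reverse ≠ ('-' :: Nat.toDigits 10 m) := by
  intro h
  have hnil : Nat.toDigits 10 m ≠ [] := by
    rw [pv_toDigits_eq 10 m (by norm_num) hm]
    simpa using Nat.digits_ne_nil_iff_ne_zero.mpr hm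
  have hh : ('-' :: Nat.toDigits 10 m).reverse.head? = some '-' := by rw [h]; rfl
  rw [List.head?_reverse] at hh
  have hlast : ('-' :: Nat.toDigits 10 m).getLast? = (Nat.toDigits 10 m).getLast? := by
    cases hds : Nat.toDigits 10 m with
    | nil => exact absurd hds hnil
    | cons a t => simp [List.getLast?_cons_cons]
  rw [hlast, List.getLast?_eq_some_getLast hnil] at hh
  have hmem := List.getLast_mem hnil
  obtain ⟨d, hd, he⟩ := pv_mem_toDigits 10 m (by norm_num) hmem
  rw [he] at hh
  have : ∀ d, d < 16 → Nat.digitChar d ≠ '-' := by decide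
  exact this d (by omega) (Option.some.inj hh)

-- ===== VERDICT (by name: the statement is the Claim_ definition above) =====
theorem is_pbin_spec : Claim_equal_is_pbin := by
  intro x _
  unfold Spec_is_pbin
  simp only [is_pbin, is_pbin_alt]
  rw [pv_strbin x, PySem.Int.toList_toStr]
  rw [pv_loop_eq (Nat.toDigits 2 x.natAbs) (pv_h0_toDigits 2 x.natAbs (by norm_num) (by norm_num))]
  rw [pv_num_pal]
  by_cases hx : x < 0
  · have hm : x.natAbs ≠ 0 := by omega
    rw [show PySem.Int.toChars x = '-' :: Nat.toDigits 10 x.natAbs from by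
      simp [PySem.Int.toChars, hx]]
    rw [pv_loop_eq ('-' :: Nat.toDigits 10 x.natAbs) (by intro _; simp)]
    rw [if_pos hx, decide_eq_false (pv_neg_not_pal x.natAbs hm)]
  · rw [show PySem.Int.toChars x = Nat.toDigits 10 x.toNat from by
      simp [PySem.Int.toChars, hx]]
    rw [pv_loop_eq (Nat.toDigits 10 x.toNat) (pv_h0_toDigits 10 x.toNat (by norm_num) (by norm_num))]
    rw [pv_num_pal10, if_neg hx]
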